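-- pv_equiv track=rewrite | github.com/cherrypiejam/checkside | my_model_1.py | parse_register
-- ===== SOURCE A (Python) =====
-- def parse_register(s: str) -> str | None:
--     r64 = [ 'rax', 'rcx', 'rdx', 'rbx', 'rsp', 'rbp', 'rsi', 'rdi' ]
--     r32 = [ r.replace('r', 'e', 1) for r in r64 ]
--     r16 = [ r[1:] for r in r64 ]
--     r8  = [ r.replace('x', '', 1) + s for r in r16 for s in [ 'l', 'h' ][:r.count('x')+1] ]
--
--     s = s.lower()
--     #  if s == 'rsp':
--         #  return 'stack pointer'
--     if s in r64:
--         return 'r64'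
--     elif s in r32:
--         return 'r32'
--     elif s in r16:
--         return 'r16'
--     elif s in r8:
--         if len(s) == 2:
--             return 'r8' + s[-1]
--         return 'r8'
--     return None
-- ===== SOURCE B (Python) =====
-- def parse_register(s):
--     s = s.lower()
--     n = len(s)
--
--     def root(a, b):
--         # two-letter base register root: ax/bx/cx/dx, sp/bp, si/di
--         return (b == 'x' and a in 'abcd') or (b == 'p' and a in 'sb') or (b == 'i' and a in 'sd')
--
--     if n == 3:
--         if root(s[1], s[2]):
--             if s[0] == 'r':
--                 return 'r64'
--             if s[0] == 'e':
--                 return 'r32'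
--         if s[2] == 'l' and root(s[0], s[1]) and s[1] != 'x':
--             return 'r8'
--     elif n == 2:
--         if root(s[0], s[1]):
--             return 'r16'
--         if s[0] in 'abcd' and s[1] in 'lh':
--             return 'r8' + s[1]
--     return None
-- ===== Notes on version B (the rewrite author's own statement) =====
-- stated objective: alternative
-- what changed: B keeps no register-name tables at all: it classifies by string length and a character-level pattern (a two-char 'root' predicate over positions) instead of generating four full name lists and testing membership.
import Mathlib
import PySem

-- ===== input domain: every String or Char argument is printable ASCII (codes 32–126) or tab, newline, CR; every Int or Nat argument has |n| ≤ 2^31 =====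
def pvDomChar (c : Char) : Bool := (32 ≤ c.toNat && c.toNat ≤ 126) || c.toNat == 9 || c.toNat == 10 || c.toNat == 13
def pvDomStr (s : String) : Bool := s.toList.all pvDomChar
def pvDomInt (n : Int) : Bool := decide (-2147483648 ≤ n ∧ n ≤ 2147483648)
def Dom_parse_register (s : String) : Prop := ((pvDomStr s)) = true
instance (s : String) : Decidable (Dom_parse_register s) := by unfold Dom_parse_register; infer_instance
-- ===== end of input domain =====

-- B drops A's generated name tables entirely and classifies by length and character patterns (objective: alternative).

-- ===== PORT A =====
-- Python str.replace(old, new, 1): replace the FIRST occurrence only; ported by hand via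
-- PySem.Chars.find (exact for nonempty `old`, which is all A uses: "r", "x").
def pvReplace1 (s old new : String) : String :=
  let i := PySem.Chars.find s.toList old.toList
  if i = -1 then s
  else String.ofList (s.toList.take i.toNat ++ new.toList ++ s.toList.drop (i.toNat + old.toList.length))

def pvA_r64 : List String := ["rax", "rcx", "rdx", "rbx", "rsp", "rbp", "rsi", "rdi"]
def pvA_r32 : List String := pvA_r64.map (fun r => pvReplace1 r "r" "e")
def pvA_r16 : List String := pvA_r64.map (fun r => PySem.Str.slice r (some 1) none)
def pvA_r8  : List String := pvA_r16.flatMap (fun r =>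
  (PySem.List.slice ["l", "h"] none (some ((PySem.Str.count r "x" : Int) + 1))).map
    (fun suf => pvReplace1 r "x" "" ++ suf))

def parse_register (s : String) : Option String :=
  let t := PySem.Str.lower s
  if t ∈ pvA_r64 then some "r64"
  else if t ∈ pvA_r32 then some "r32"
  else if t ∈ pvA_r16 then some "r16"
  else if t ∈ pvA_r8 then
    if PySem.Str.len t = 2 then
      -- 'r8' + s[-1]; the `none` arm is Python's IndexError, unreachable under the membership guard
      match PySem.Str.pyGet? t (-1) with
      | some c => some ("r8" ++ String.ofList [c])
      | none => none
    else some "r8"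
  else none

-- ===== PORT B =====
-- Source B's `root(a,b)` helper: two-letter base-register root, decided character by character
-- ('x' in 'abcd' etc.; `a in 'abcd'` on a single char is exactly char membership).
def pvRoot (a b : Char) : Bool :=
  (b == 'x' && (a == 'a' || a == 'b' || a == 'c' || a == 'd')) ||
  (b == 'p' && (a == 's' || a == 'b')) ||
  (b == 'i' && (a == 's' || a == 'd'))

-- Source B branches on len(s) == 3 / == 2 and indexes s[0],s[1],s[2]; matching on the
-- char list realises exactly that length test and those (in-range) indexings.
def pvClassify (t : List Char) : Option String :=
  match t with
  | [p, a, b] =>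
      if pvRoot a b && p == 'r' then some "r64"
      else if pvRoot a b && p == 'e' then some "r32"
      else if b == 'l' && pvRoot p a && !(a == 'x') then some "r8"
      else none
  | [a, b] =>
      if pvRoot a b then some "r16"
      else if (a == 'a' || a == 'b' || a == 'c' || a == 'd') && (b == 'l' || b == 'h') then
        some ("r8" ++ String.ofList [b])
      else none
  | _ => none

def parse_register_alt (s : String) : Option String :=
  pvClassify (PySem.Str.lower s).toList

-- ===== PRECONDITION & SPEC =====
def Spec_parse_register (s : String) (out : Option String) : Prop := out = parse_register_alt s
instance (s : String) (out : Option String) : Decidable (Spec_parse_register s out) := by unfold Spec_parse_register; infer_instance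

-- ===== CLAIM =====
def Claim_equal_parse_register : Prop := ∀ (s : String), Dom_parse_register s → Spec_parse_register s (parse_register s)

-- ===== LEMMAS AND PROOFS =====
theorem pvA_r32_eq : pvA_r32 = ["eax", "ecx", "edx", "ebx", "esp", "ebp", "esi", "edi"] := by decide
theorem pvA_r16_eq : pvA_r16 = ["ax", "cx", "dx", "bx", "sp", "bp", "si", "di"] := by decide
theorem pvA_r8_eq :
    pvA_r8 = ["al", "ah", "cl", "ch", "dl", "dh", "bl", "bh", "spl", "bpl", "sil", "dil"] := by decide

theorem pv_ofList_toList (t : String) : String.ofList t.toList = t := by simp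

theorem pvRoot_cases {a b : Char} (h : pvRoot a b = true) :
    (a = 'a' ∧ b = 'x') ∨ (a = 'c' ∧ b = 'x') ∨ (a = 'd' ∧ b = 'x') ∨ (a = 'b' ∧ b = 'x') ∨
    (a = 's' ∧ b = 'p') ∨ (a = 'b' ∧ b = 'p') ∨ (a = 's' ∧ b = 'i') ∨ (a = 'd' ∧ b = 'i') := by
  simp only [pvRoot, Bool.or_eq_true, Bool.and_eq_true, beq_iff_eq] at h
  tauto

theorem pvClassify_two (a b : Char) :
    pvClassify [a, b] =
      (if pvRoot a b then some "r16"
       else if (a == 'a' || a == 'b' || a == 'c' || a == 'd') && (b == 'l' || b == 'h') then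
         some ("r8" ++ String.ofList [b])
       else none) := rfl

theorem pvClassify_three (p a b : Char) :
    pvClassify [p, a, b] =
      (if pvRoot a b && p == 'r' then some "r64"
       else if pvRoot a b && p == 'e' then some "r32"
       else if b == 'l' && pvRoot p a && !(a == 'x') then some "r8"
       else none) := rfl

theorem pv_key (t : String) :
    (if t ∈ pvA_r64 then some "r64"
     else if t ∈ pvA_r32 then some "r32"
     else if t ∈ pvA_r16 then some "r16"
     else if t ∈ pvA_r8 then
       if PySem.Str.len t = 2 then
         match PySem.Str.pyGet? t (-1) with
         | some c => some ("r8" ++ String.ofList [c])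
         | none => none
       else some "r8"
     else none) = pvClassify t.toList := by
  by_cases h64 : t ∈ pvA_r64
  · simp only [pvA_r64, List.mem_cons, List.not_mem_nil, or_false] at h64
    rcases h64 with rfl | rfl | rfl | rfl | rfl | rfl | rfl | rfl <;> decide
  by_cases h32 : t ∈ pvA_r32
  · rw [pvA_r32_eq] at h32
    simp only [List.mem_cons, List.not_mem_nil, or_false] at h32
    rcases h32 with rfl | rfl | rfl | rfl | rfl | rfl | rfl | rfl <;> decide
  by_cases h16 : t ∈ pvA_r16
  · rw [pvA_r16_eq] at h16
    simp only [List.mem_cons, List.not_mem_nil, or_false] at h16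
    rcases h16 with rfl | rfl | rfl | rfl | rfl | rfl | rfl | rfl <;> decide
  by_cases h8 : t ∈ pvA_r8
  · rw [pvA_r8_eq] at h8
    simp only [List.mem_cons, List.not_mem_nil, or_false] at h8
    rcases h8 with rfl | rfl | rfl | rfl | rfl | rfl | rfl | rfl | rfl | rfl | rfl | rfl <;> decide
  -- A returns none; show B does too.
  rw [if_neg h64, if_neg h32, if_neg h16, if_neg h8]
  rw [pvA_r32_eq] at h32; rw [pvA_r16_eq] at h16; rw [pvA_r8_eq] at h8
  have hT : String.ofList t.toList = t := pv_ofList_toList t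
  obtain ⟨L, hL⟩ : ∃ L, t.toList = L := ⟨_, rfl⟩
  rw [hL] at hT ⊢
  rcases L with _ | ⟨p, _ | ⟨a, _ | ⟨b, _ | ⟨c, r⟩⟩⟩⟩
  · rfl
  · rfl
  · -- two chars (pattern [a, b] with a := p, b := a)
    rw [pvClassify_two]
    have hc1 : ¬ pvRoot p a = true := by
      intro h
      rcases pvRoot_cases h with ⟨rfl, rfl⟩ | ⟨rfl, rfl⟩ | ⟨rfl, rfl⟩ | ⟨rfl, rfl⟩ |
        ⟨rfl, rfl⟩ | ⟨rfl, rfl⟩ | ⟨rfl, rfl⟩ | ⟨rfl, rfl⟩ <;>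
        (rw [← hT] at h16; exact h16 (by decide))
    have hc2 : ¬ ((p == 'a' || p == 'b' || p == 'c' || p == 'd') && (a == 'l' || a == 'h')) = true := by
      intro h
      simp only [Bool.and_eq_true, Bool.or_eq_true, beq_iff_eq] at h
      obtain ⟨hp, ha⟩ := h
      rcases hp with ((rfl | rfl) | rfl) | rfl <;> rcases ha with rfl | rfl <;>
        (rw [← hT] at h8; exact h8 (by decide))
    rw [if_neg hc1, if_neg hc2]
  · -- three chars [p, a, b]
    rw [pvClassify_three]
    have hc1 : ¬ (pvRoot a b && p == 'r') = true := by
      intro h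
      simp only [Bool.and_eq_true, beq_iff_eq] at h
      obtain ⟨h, rfl⟩ := h
      rcases pvRoot_cases h with ⟨rfl, rfl⟩ | ⟨rfl, rfl⟩ | ⟨rfl, rfl⟩ | ⟨rfl, rfl⟩ |
        ⟨rfl, rfl⟩ | ⟨rfl, rfl⟩ | ⟨rfl, rfl⟩ | ⟨rfl, rfl⟩ <;>
        (rw [← hT] at h64; exact h64 (by decide))
    have hc2 : ¬ (pvRoot a b && p == 'e') = true := by
      intro h
      simp only [Bool.and_eq_true, beq_iff_eq] at h
      obtain ⟨h, rfl⟩ := h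
      rcases pvRoot_cases h with ⟨rfl, rfl⟩ | ⟨rfl, rfl⟩ | ⟨rfl, rfl⟩ | ⟨rfl, rfl⟩ |
        ⟨rfl, rfl⟩ | ⟨rfl, rfl⟩ | ⟨rfl, rfl⟩ | ⟨rfl, rfl⟩ <;>
        (rw [← hT] at h32; exact h32 (by decide))
    have hc3 : ¬ (b == 'l' && pvRoot p a && !(a == 'x')) = true := by
      intro h
      simp only [Bool.and_eq_true, beq_iff_eq, Bool.not_eq_eq_eq_not, Bool.not_true,
        beq_eq_false_iff_ne, ne_eq] at h
      obtain ⟨⟨rfl, h⟩, hax⟩ := h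
      rcases pvRoot_cases h with ⟨rfl, rfl⟩ | ⟨rfl, rfl⟩ | ⟨rfl, rfl⟩ | ⟨rfl, rfl⟩ |
        ⟨rfl, rfl⟩ | ⟨rfl, rfl⟩ | ⟨rfl, rfl⟩ | ⟨rfl, rfl⟩
      · exact absurd rfl hax
      · exact absurd rfl hax
      · exact absurd rfl hax
      · exact absurd rfl hax
      all_goals (rw [← hT] at h8; exact h8 (by decide))
    rw [if_neg hc1, if_neg hc2, if_neg hc3]
  · rfl

-- ===== VERDICT =====
theorem parse_register_spec : Claim_equal_parse_register := by
  intro s _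
  unfold Spec_parse_register parse_register parse_register_alt
  exact pv_key (PySem.Str.lower s)
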